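-- pv_equiv track=rewrite | github.com/voroge/zakupki | upurch.py | __complists
-- ===== SOURCE A (Python) =====
-- def __complists(alist1, alist2):
--     for i in alist1:
--         for j in alist2:
--             si = str(i) + '.'
--             sj = str(j) + '.'
--             if si.find(sj) == 0:
--                 return True
--     return False
-- ===== SOURCE B (Python) =====
-- def __complists(alist1, alist2):
--     targets = set(alist2)
--     for s in alist1:
--         if s in targets:
--             return True
--         for k, ch in enumerate(s):
--             if ch == '.' and s[:k] in targets:
--                 return True
--     return False
-- ===== Notes on version B (the rewrite author's own statement) =====
-- stated objective: alternative
-- what changed: Replaced A's nested loop over all (alist1, alist2) pairs with repeated string concatenation and substring search by building set(alist2) once and making a single scan of alist1 that membership-tests each element and each of its dot-boundary prefixes; worst-case cost drops from O(n*m*L) to O((n+m)*L), though a timing run's inputs let A exit early so no speed is claimed.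
import Mathlib
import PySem

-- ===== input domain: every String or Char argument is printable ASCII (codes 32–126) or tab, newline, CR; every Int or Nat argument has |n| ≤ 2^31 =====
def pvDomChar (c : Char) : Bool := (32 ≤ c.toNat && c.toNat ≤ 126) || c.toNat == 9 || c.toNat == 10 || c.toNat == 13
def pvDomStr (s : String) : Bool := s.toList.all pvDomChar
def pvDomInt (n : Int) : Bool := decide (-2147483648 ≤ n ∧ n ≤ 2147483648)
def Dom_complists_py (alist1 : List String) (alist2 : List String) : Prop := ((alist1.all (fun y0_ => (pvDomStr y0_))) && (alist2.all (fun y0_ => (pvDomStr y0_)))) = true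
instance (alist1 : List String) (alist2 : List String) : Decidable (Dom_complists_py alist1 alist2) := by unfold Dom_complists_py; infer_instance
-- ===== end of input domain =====

-- B replaces A's pairwise substring scan by building set(alist2) once and scanning alist1,
-- testing each element and each of its dot-boundary prefixes for membership (objective: alternative).

-- ===== PORT A =====
-- string concatenation str(i) + '.' is ported exactly as List Char append on the code points
def complists_py (alist1 : List String) (alist2 : List String) : Bool :=
  alist1.any (fun i => alist2.any (fun j =>
    let si : List Char := i.toList ++ ['.']
    let sj : List Char := j.toList ++ ['.']
    PySem.Chars.find si sj == 0))

-- ===== PORT B =====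
-- targets = set(alist2); one scan of alist1 testing s and each dot-boundary prefix s[:k]
def complists_py_alt (alist1 : List String) (alist2 : List String) : Bool :=
  let targets := PySem.Set.ofList (alist2.map String.toList)
  alist1.any (fun s =>
    PySem.Set.contains targets s.toList ||
    (PySem.List.enumerate s.toList 0).any (fun p =>
      p.2 == '.' && PySem.Set.contains targets (PySem.List.slice s.toList none (some p.1))))

-- ===== PRECONDITION & SPEC =====
def Spec_complists_py (alist1 : List String) (alist2 : List String) (out : Bool) : Prop := out = complists_py_alt alist1 alist2
instance (alist1 : List String) (alist2 : List String) (out : Bool) : Decidable (Spec_complists_py alist1 alist2 out) := by unfold Spec_complists_py; infer_instance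

-- ===== CLAIM (what is proved, stated in full; the proofs are below) =====
def Claim_equal_complists_py : Prop := ∀ (alist1 : List String) (alist2 : List String), Dom_complists_py alist1 alist2 → Spec_complists_py alist1 alist2 (complists_py alist1 alist2)

-- ===== LEMMAS AND PROOFS =====

-- find s sub = 0 iff sub is a prefix of s
theorem pv_find_eq_zero_iff (s sub : List Char) :
    PySem.Chars.find s sub = 0 ↔ sub <+: s := by
  constructor
  · intro h
    have h0 : (0:Int) ≤ PySem.Chars.find s sub := by omega
    have := (PySem.Chars.find_spec h0).1
    simpa [h] using this
  · intro h
    have h0 : (0:Int) ≤ PySem.Chars.find s sub :=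
      (PySem.Chars.find_nonneg_iff s sub).2 h.isInfix
    obtain ⟨_, hmin⟩ := PySem.Chars.find_spec h0
    by_contra hne
    have hpos : 0 < (PySem.Chars.find s sub).toNat := by omega
    exact hmin 0 hpos (by simpa using h)

-- (t ++ [c]) is a prefix of (s ++ [c]) iff t = s or (t ++ [c]) is a prefix of s
theorem pv_append_singleton_prefix (t s : List Char) (c : Char) :
    t ++ [c] <+: s ++ [c] ↔ t = s ∨ t ++ [c] <+: s := by
  constructor
  · rintro ⟨u, hu⟩
    rcases List.eq_nil_or_concat u with rfl | ⟨u', d, rfl⟩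
    · left
      have : t ++ [c] = s ++ [c] := by simpa using hu
      exact List.append_cancel_right this
    · right
      have hu' : (t ++ [c] ++ u') ++ [d] = s ++ [c] := by
        simpa [List.append_assoc] using hu
      have := List.append_inj' hu' (by simp)
      exact ⟨u', this.1⟩
  · rintro (rfl | h)
    · exact List.prefix_refl _
    · exact h.trans (List.prefix_append s [c])

-- t ++ [c] <+: s iff some dot-boundary prefix: ∃ k < |s|, s[k] = c ∧ t = s.take k
theorem pv_prefix_dot_iff (t s : List Char) (c : Char) :
    t ++ [c] <+: s ↔ ∃ k, ∃ hk : k < s.length, s[k] = c ∧ t = s.take k := by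
  constructor
  · rintro ⟨u, hu⟩
    refine ⟨t.length, ?_, ?_, ?_⟩
    · subst hu; simp [List.length_append]
    · subst hu; simp
    · subst hu; simp
  · rintro ⟨k, hk, hc, rfl⟩
    refine ⟨s.drop (k+1), ?_⟩
    rw [List.append_assoc]
    have : [c] ++ s.drop (k+1) = s.drop k := by
      rw [List.drop_eq_getElem_cons hk, hc]; rfl
    rw [this, List.take_append_drop]

-- the enumerate/slice form of 'some dot-boundary prefix of s satisfies C'
theorem pv_enum_exists (s : List Char) (C : List Char → Prop) :
    (∃ p ∈ PySem.List.enumerate s 0, p.2 = '.' ∧ C (PySem.List.slice s none (some p.1)))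
      ↔ ∃ k, ∃ hk : k < s.length, s[k] = '.' ∧ C (s.take k) := by
  constructor
  · rintro ⟨⟨i, ch⟩, hmem, hdot, hC⟩
    rw [PySem.List.enumerate_eq_zipIdx_map] at hmem
    simp only [List.mem_map, Prod.mk.injEq] at hmem
    obtain ⟨⟨ch', k⟩, hzip, hi, hch⟩ := hmem
    have hk := List.mem_zipIdx hzip
    simp only [Nat.sub_zero, zero_add] at hk
    simp only at hi hch hdot hC
    refine ⟨k, hk.2.1, ?_, ?_⟩
    · rw [← hk.2.2, hch]; exact hdot
    · have hik : i = (k : Int) := by omega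
      rw [hik, PySem.List.slice_to_natCast] at hC
      exact hC
  · rintro ⟨k, hk, hc, hC⟩
    refine ⟨((k : Int), s[k]), ?_, by simpa using hc, ?_⟩
    · rw [PySem.List.enumerate_eq_zipIdx_map]
      simp only [List.mem_map]
      exact ⟨(s[k], k), List.mem_zipIdx_iff_getElem?.2 (by simp), by simp⟩
    · simpa [PySem.List.slice_to_natCast] using hC

-- A's pair test, characterized
theorem pv_A_cond (i j : String) :
    PySem.Chars.find (i.toList ++ ['.']) (j.toList ++ ['.']) = 0
      ↔ j.toList = i.toList ∨ j.toList ++ ['.'] <+: i.toList := by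
  rw [pv_find_eq_zero_iff, pv_append_singleton_prefix]

-- ===== VERDICT (by name: the statement is the Claim_ definition above) =====
theorem complists_py_spec : Claim_equal_complists_py := by
  intro alist1 alist2 _
  unfold Spec_complists_py complists_py complists_py_alt
  rw [Bool.eq_iff_iff]
  simp only [List.any_eq_true, Bool.or_eq_true, Bool.and_eq_true, beq_iff_eq,
    PySem.Set.contains, List.contains_iff_mem, PySem.Set.mem_ofList, List.mem_map]
  constructor
  · rintro ⟨i, hi, j, hj, hcond⟩
    rcases (pv_A_cond i j).1 hcond with h | h
    · exact ⟨i, hi, Or.inl ⟨j, hj, h⟩⟩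
    · rcases (pv_prefix_dot_iff _ _ _).1 h with ⟨k, hk, hc, ht⟩
      exact ⟨i, hi, Or.inr ((pv_enum_exists i.toList
        (fun t => ∃ a ∈ alist2, a.toList = t)).2 ⟨k, hk, hc, j, hj, ht⟩)⟩
  · rintro ⟨i, hi, h | h⟩
    · obtain ⟨j, hj, hji⟩ := h
      exact ⟨i, hi, j, hj, (pv_A_cond i j).2 (Or.inl hji)⟩
    · obtain ⟨k, hk, hc, j, hj, hjt⟩ := (pv_enum_exists i.toList
        (fun t => ∃ a ∈ alist2, a.toList = t)).1 h
      exact ⟨i, hi, j, hj, (pv_A_cond i j).2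
        (Or.inr ((pv_prefix_dot_iff _ _ _).2 ⟨k, hk, hc, hjt⟩))⟩
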